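-- pv_equiv track=rewrite | github.com/rx10/AoC-2024 | 6.py | part_two
-- ===== SOURCE A (Python) =====
-- from functools import cmp_to_key
--
-- def part_two(incorrect_updates, dict):
--     def comp_instructions(page_a, page_b):
--         if page_b in dict[page_a]:
--             return -1;
--         if page_a in dict[page_b]:
--             return 1;
--
--     summation = 0;
--     for arr in incorrect_updates:
--         arr = sorted(arr, key=cmp_to_key(comp_instructions))
--         mid = len(arr)//2
--         summation+=int(arr[mid])
--     return summation;
-- ===== SOURCE B (Python) =====
-- def part_two(incorrect_updates, dict):
--     # Rank-count selection: the middle page of the correctly ordered update is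
--     # the page with exactly len(arr)//2 predecessors under the rules; no sort.
--     total = 0
--     for arr in incorrect_updates:
--         mid = len(arr) // 2
--         p = next(x for x in arr
--                  if sum(1 for q in arr if q != x and x in dict[q]) == mid)
--         total += int(p)
--     return total
-- ===== Notes on version B (the rewrite author's own statement) =====
-- stated objective: alternative
-- what changed: Replaces the cmp_to_key comparator sort of each update by a rank-count selection: the middle page is picked directly as the page with exactly len(arr)//2 predecessors under the rules, so no sorted order is ever built.
-- outside the precondition, e.g. on part_two([['1', '2', '3']], {'1': ['2'], '2': ['3'], '3': ['1']}): A returns 2, B returns 1; on part_two([['7', '7']], {'7': ['7']}): A returns 7, B raises StopIteration; on part_two([['2', '1']], {'1': ['2']}): A returns 2, B returns 2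
import Mathlib
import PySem

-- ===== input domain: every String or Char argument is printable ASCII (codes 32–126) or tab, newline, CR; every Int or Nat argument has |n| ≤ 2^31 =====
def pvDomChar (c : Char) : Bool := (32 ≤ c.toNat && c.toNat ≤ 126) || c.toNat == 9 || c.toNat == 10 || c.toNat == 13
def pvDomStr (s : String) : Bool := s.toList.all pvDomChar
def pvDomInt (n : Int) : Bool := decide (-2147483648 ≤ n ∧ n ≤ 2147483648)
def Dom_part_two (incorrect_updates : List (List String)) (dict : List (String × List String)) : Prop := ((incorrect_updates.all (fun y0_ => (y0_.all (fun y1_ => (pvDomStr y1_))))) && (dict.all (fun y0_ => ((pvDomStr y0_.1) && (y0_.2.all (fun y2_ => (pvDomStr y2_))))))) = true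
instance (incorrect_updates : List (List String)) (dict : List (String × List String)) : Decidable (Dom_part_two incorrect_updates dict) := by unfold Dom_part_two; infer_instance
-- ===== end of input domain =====

-- B replaces A's comparator sort of each update by a direct rank-count selection of the
-- middle page (objective: alternative algorithm, no sorted order is built); proved equal
-- on updates whose rules form a strict total order (Pre_), where A returns normally.

-- ===== PORT A =====
-- comp_lt d a b = (comp_instructions(a, b) == -1), i.e. "a sorts strictly before b"
def comp_lt (dict : List (String × List String)) (a b : String) : Bool :=
  decide (b ∈ PySem.Dict.getD (PySem.Dict.ofList dict) a [])

def part_two (incorrect_updates : List (List String)) (dict : List (String × List String)) : Int :=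
  incorrect_updates.foldl
    (fun summation arr =>
      -- sorted(arr, key=cmp_to_key(comp_instructions)): hand-ported as the stable
      -- insertion sort by the comparator; exact under Pre_ (the rules are a strict
      -- total order on the update, so the sorted permutation is unique).
      let sorted_arr :=
        arr.foldl (fun acc x => PySem.List.insertBy (comp_lt dict) x acc) []
      let mid : Nat := sorted_arr.length / 2
      -- int(arr[mid]); IndexError/ValueError are excluded by Pre_ (arr nonempty, pages int-like)
      summation + (((PySem.List.pyGet? sorted_arr (mid : Int)).bind PySem.Int.ofStr?).getD 0))
    0

-- ===== PORT B =====
-- next(x for x in arr if sum(1 for q in arr if q != x and x in dict[q]) == mid)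
def midpage (dict : List (String × List String)) (arr : List String) : Option String :=
  arr.find? (fun p =>
    decide (arr.countP (fun q => q != p && decide (p ∈ PySem.Dict.getD (PySem.Dict.ofList dict) q [])) = arr.length / 2))

def part_two_alt (incorrect_updates : List (List String)) (dict : List (String × List String)) : Int :=
  incorrect_updates.foldl
    (fun total arr =>
      match midpage dict arr with
      | some p => total + (PySem.Int.ofStr? p).getD 0   -- total += int(p)
      | none => total)  -- unreachable under Pre_ (Python B raises StopIteration here)
    0

-- ===== PRECONDITION & SPEC =====
-- Pre_ excludes inputs on which A's value is an accident or A raises: updates that are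
-- empty or have duplicate pages, pages that are not int-parseable, missing dict keys on
-- multi-page updates, and rule sets that are not a strict total order on the update
-- (there Python's comparator sort raises TypeError/KeyError or its result depends on
-- Timsort's comparison pattern).
def Pre_part_two (incorrect_updates : List (List String)) (dict : List (String × List String)) : Prop :=
  ∀ arr ∈ incorrect_updates,
    arr ≠ [] ∧ arr.Nodup ∧
    (∀ p ∈ arr, (PySem.Int.ofStr? p).isSome) ∧
    (2 ≤ arr.length → ∀ p ∈ arr, (PySem.Dict.get? (PySem.Dict.ofList dict) p).isSome) ∧
    (∀ p ∈ arr, ∀ q ∈ arr, p ≠ q → (comp_lt dict p q = true ↔ comp_lt dict q p = false)) ∧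
    (∀ p ∈ arr, ∀ q ∈ arr, ∀ r ∈ arr,
      comp_lt dict p q = true → comp_lt dict q r = true → comp_lt dict p r = true)

instance (incorrect_updates : List (List String)) (dict : List (String × List String)) : Decidable (Pre_part_two incorrect_updates dict) := by unfold Pre_part_two; infer_instance

def pvWitness_part_two : List (List String) × (List (String × List String)) :=
  ([["3", "1", "2"]], [("1", ["2", "3"]), ("2", ["3"]), ("3", [])])

def Spec_part_two (incorrect_updates : List (List String)) (dict : List (String × List String)) (out : Int) : Prop := out = part_two_alt incorrect_updates dict
instance (incorrect_updates : List (List String)) (dict : List (String × List String)) (out : Int) : Decidable (Spec_part_two incorrect_updates dict out) := by unfold Spec_part_two; infer_instance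

-- ===== CLAIM (what is proved, stated in full; the proofs are below) =====
def Claim_equal_part_two : Prop := ∀ (incorrect_updates : List (List String)) (dict : List (String × List String)), Dom_part_two incorrect_updates dict → Pre_part_two incorrect_updates dict → Spec_part_two incorrect_updates dict (part_two incorrect_updates dict)

-- ===== LEMMAS AND PROOFS =====

-- Inserting a fresh element preserves sortedness w.r.t. a strict total order on s.
theorem insertBy_pairwise {α : Type} (bf : α → α → Bool) (s : List α)
    (htot : ∀ p ∈ s, ∀ q ∈ s, p ≠ q → (bf p q = true ↔ bf q p = false))
    (htr : ∀ p ∈ s, ∀ q ∈ s, ∀ r ∈ s, bf p q = true → bf q r = true → bf p r = true)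
    (x : α) (hx : x ∈ s) : ∀ (ys : List α), (∀ y ∈ ys, y ∈ s) → x ∉ ys →
    ys.Pairwise (fun a b => bf a b = true) →
    (PySem.List.insertBy bf x ys).Pairwise (fun a b => bf a b = true) := by
  intro ys
  induction ys with
  | nil =>
    intro _ _ _
    simp [PySem.List.insertBy]
  | cons y ys ih =>
    intro hys hnx hpw
    rw [List.pairwise_cons] at hpw
    obtain ⟨hhead, htail⟩ := hpw
    have hy : y ∈ s := hys y (by simp)
    have hys' : ∀ z ∈ ys, z ∈ s := fun z hz => hys z (by simp [hz])
    have hxy : x ≠ y := fun h => hnx (by simp [h])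
    simp only [PySem.List.insertBy]
    by_cases hb : bf x y = true
    · simp only [hb, if_true]
      constructor
      · intro z hz
        rcases List.mem_cons.mp hz with rfl | hz'
        · exact hb
        · exact htr x hx y hy z (hys' z hz') hb (hhead z hz')
      · exact List.pairwise_cons.mpr ⟨hhead, htail⟩
    · simp only [hb]
      have hyx : bf y x = true :=
        (htot y hy x hx (Ne.symm hxy)).mpr (by simpa using hb)
      constructor
      · intro z hz
        rcases (PySem.List.mem_insertBy bf x z ys).mp hz with rfl | hz'
        · exact hyx
        · exact hhead z hz'
      · exact ih hys' (fun h => hnx (by simp [h])) htail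

-- The insertion-sort fold produces a sorted list.
theorem foldl_insertBy_pairwise {α : Type} (bf : α → α → Bool) (s : List α)
    (htot : ∀ p ∈ s, ∀ q ∈ s, p ≠ q → (bf p q = true ↔ bf q p = false))
    (htr : ∀ p ∈ s, ∀ q ∈ s, ∀ r ∈ s, bf p q = true → bf q r = true → bf p r = true) :
    ∀ (l acc : List α), (∀ y ∈ l, y ∈ s) → (∀ y ∈ acc, y ∈ s) → (l ++ acc).Nodup →
      acc.Pairwise (fun a b => bf a b = true) →
      (l.foldl (fun a x => PySem.List.insertBy bf x a) acc).Pairwise (fun a b => bf a b = true) := by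
  intro l
  induction l with
  | nil =>
    intro acc _ _ _ hpw
    simpa using hpw
  | cons x t ih =>
    intro acc hl hacc hnd hpw
    have hx : x ∈ s := hl x (by simp)
    have hnd' : (x :: (t ++ acc)).Nodup := by simpa using hnd
    have hxacc : x ∉ acc := fun h => (List.nodup_cons.mp hnd').1 (List.mem_append.mpr (Or.inr h))
    have hperm : (t ++ PySem.List.insertBy bf x acc).Perm (x :: (t ++ acc)) :=
      (List.Perm.append_left t (PySem.List.insertBy_perm bf x acc)).trans List.perm_middle
    simp only [List.foldl_cons]
    exact ih (PySem.List.insertBy bf x acc)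
      (fun y hy => hl y (by simp [hy]))
      (fun y hy => by
        rcases (PySem.List.mem_insertBy bf x y acc).mp hy with rfl | hy'
        · exact hx
        · exact hacc y hy')
      (hperm.nodup_iff.mpr hnd')
      (insertBy_pairwise bf s htot htr x hx acc hacc hxacc hpw)

-- In a sorted duplicate-free list, the element at index i has exactly i strict predecessors.
theorem countP_pred_of_pairwise (bf : String → String → Bool) :
    ∀ (S : List String), S.Pairwise (fun a b => bf a b = true) → S.Nodup →
    (∀ p ∈ S, ∀ q ∈ S, p ≠ q → (bf p q = true ↔ bf q p = false)) →
    ∀ i (hi : i < S.length),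
      S.countP (fun q => q != S[i] && bf q S[i]) = i := by
  intro S
  induction S with
  | nil => intro _ _ _ i hi; simp at hi
  | cons a T ih =>
    intro hpw hnd hasym i hi
    rw [List.pairwise_cons] at hpw
    obtain ⟨hhead, htail⟩ := hpw
    rw [List.nodup_cons] at hnd
    obtain ⟨haT, hndT⟩ := hnd
    cases i with
    | zero =>
      simp only [List.getElem_cons_zero, List.countP_cons]
      have h1 : (a != a && bf a a) = false := by simp
      rw [h1]
      have h0 : T.countP (fun q => q != a && bf q a) = 0 := by
        rw [List.countP_eq_zero]
        intro q hq
        have hqa : q ≠ a := fun h => haT (h ▸ hq)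
        have : bf q a = false :=
          (hasym a (by simp) q (by simp [hq]) (Ne.symm hqa)).mp (hhead q hq)
        simp [this]
      simp [h0]
    | succ i =>
      have hiT : i < T.length := by simpa using hi
      simp only [List.getElem_cons_succ, List.countP_cons]
      have hTm : T[i] ∈ T := List.getElem_mem hiT
      have h1 : (a != T[i] && bf a T[i]) = true := by
        have : a ≠ T[i] := fun h => haT (h ▸ hTm)
        simp [this, hhead T[i] hTm]
      rw [h1]
      have h2 : T.countP (fun q => q != T[i] && bf q T[i]) = i :=
        ih htail hndT
          (fun p hp q hq => hasym p (by simp [hp]) q (by simp [hq])) i hiT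
      simp [h2]

-- find? returns the unique element satisfying the predicate.
theorem find?_eq_of_unique {α : Type} (pred : α → Bool) (a : α) :
    ∀ (l : List α), a ∈ l → pred a = true → (∀ x ∈ l, pred x = true → x = a) →
      l.find? pred = some a := by
  intro l
  induction l with
  | nil => intro h; simp at h
  | cons b t ih =>
    intro hmem hpa huniq
    by_cases hb : pred b = true
    · have : b = a := huniq b (by simp) hb
      simp [List.find?, this ▸ hb, this]
    · have hba : b ≠ a := fun h => hb (h ▸ hpa)
      have hat : a ∈ t := by
        rcases List.mem_cons.mp hmem with h | h
        · exact absurd h.symm hba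
        · exact h
      simp only [List.find?, Bool.not_eq_true] at hb ⊢
      rw [hb]
      exact ih hat hpa (fun x hx hpx => huniq x (by simp [hx]) hpx)

-- Per-update agreement: the sorted list's middle element is B's rank-count selection.
theorem per_arr (dict : List (String × List String)) (arr : List String)
    (hne : arr ≠ []) (hnd : arr.Nodup)
    (htot : ∀ p ∈ arr, ∀ q ∈ arr, p ≠ q → (comp_lt dict p q = true ↔ comp_lt dict q p = false))
    (htr : ∀ p ∈ arr, ∀ q ∈ arr, ∀ r ∈ arr,
      comp_lt dict p q = true → comp_lt dict q r = true → comp_lt dict p r = true) :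
    (PySem.List.pyGet?
      (arr.foldl (fun acc x => PySem.List.insertBy (comp_lt dict) x acc) [])
      (((arr.foldl (fun acc x => PySem.List.insertBy (comp_lt dict) x acc) []).length / 2 : Nat) : Int))
      = midpage dict arr := by
  set bf := comp_lt dict with hbf
  set S := arr.foldl (fun acc x => PySem.List.insertBy bf x acc) [] with hS
  have hperm : S.Perm arr := by
    simpa using PySem.List.foldl_insertBy_perm bf arr []
  have hlen : S.length = arr.length := hperm.length_eq
  have hpw : S.Pairwise (fun a b => bf a b = true) :=
    foldl_insertBy_pairwise bf arr htot htr arr [] (fun y hy => hy) (by simp)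
      (by simpa using hnd) (by simp)
  have hndS : S.Nodup := hperm.nodup_iff.mpr hnd
  have hasymS : ∀ p ∈ S, ∀ q ∈ S, p ≠ q → (bf p q = true ↔ bf q p = false) :=
    fun p hp q hq => htot p (hperm.subset hp) q (hperm.subset hq)
  have hmid : S.length / 2 < S.length := by
    have : 0 < S.length := by
      rw [hlen]
      exact List.length_pos_iff.mpr hne
    omega
  have hcnt : ∀ j (hj : j < S.length),
      arr.countP (fun q => q != S[j] && bf q S[j]) = j := by
    intro j hj
    rw [← hperm.countP_eq]
    exact countP_pred_of_pairwise bf S hpw hndS hasymS j hj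
  have hmem : S[S.length / 2] ∈ arr := hperm.subset (List.getElem_mem hmid)
  have hfind : midpage dict arr = some S[S.length / 2] := by
    unfold midpage
    simp only [hbf, comp_lt] at hcnt
    apply find?_eq_of_unique _ _ arr hmem
    · rw [decide_eq_true_iff, ← hlen]
      exact hcnt _ hmid
    · intro x hx hpx
      rw [decide_eq_true_iff, ← hlen] at hpx
      obtain ⟨j, hj, rfl⟩ := List.mem_iff_getElem.mp (hperm.mem_iff.mpr hx)
      rw [hcnt j hj] at hpx
      subst hpx
      rfl
  rw [hfind, PySem.List.pyGet?_natCast]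
  exact List.getElem?_eq_getElem hmid

-- The two folds over the updates agree arr by arr.
theorem fold_eq (dict : List (String × List String)) :
    ∀ (I : List (List String)), Pre_part_two I dict → ∀ (c : Int),
      I.foldl
        (fun summation arr =>
          let sorted_arr :=
            arr.foldl (fun acc x => PySem.List.insertBy (comp_lt dict) x acc) []
          let mid : Nat := sorted_arr.length / 2
          summation + (((PySem.List.pyGet? sorted_arr (mid : Int)).bind PySem.Int.ofStr?).getD 0)) c
      = I.foldl
        (fun total arr =>
          match midpage dict arr with
          | some p => total + (PySem.Int.ofStr? p).getD 0
          | none => total) c := by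
  intro I
  induction I with
  | nil => intro _ c; rfl
  | cons arr t ih =>
    intro hpre c
    obtain ⟨hne, hnd, _, _, htot, htr⟩ := hpre arr (by simp)
    have hstep := per_arr dict arr hne hnd htot htr
    simp only [List.foldl_cons]
    rw [hstep]
    have ht : Pre_part_two t dict := fun a ha => hpre a (by simp [ha])
    rcases hmp : midpage dict arr with _ | p
    · simpa using ih ht c
    · exact ih ht _

-- ===== VERDICT (by name: the statement is the Claim_ definition above) =====
theorem part_two_spec : Claim_equal_part_two := by
  intro I dict _ hpre
  unfold Spec_part_two part_two part_two_alt
  exact fold_eq dict I hpre 0
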